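-- pv_equiv track=rewrite | github.com/zfifteen/z-band-prime-prefilter | benchmarks/python/predictor/pgs_resonance_probe.py | record_gap_indices
-- ===== SOURCE A (Python) =====
-- def record_gap_indices(gaps: list[int]) -> list[int]:
--     """Return the indices of new record gaps."""
--     indices: list[int] = []
--     largest_gap = -1
--     for index, gap in enumerate(gaps):
--         if gap > largest_gap:
--             indices.append(index)
--             largest_gap = gap
--     return indices
-- ===== SOURCE B (Python) =====
-- def record_gap_indices(gaps: list[int]) -> list[int]:
--     """Return the indices of new record gaps (prefix-maxima table, then increase detection)."""
--     prefix: list[int] = []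
--     m = None
--     for g in gaps:
--         m = g if m is None or g > m else m
--         prefix.append(m)
--     indices: list[int] = []
--     prev = -1
--     for index, value in enumerate(prefix):
--         if value > prev:
--             indices.append(index)
--             prev = value
--     return indices
-- ===== Notes on version B (the rewrite author's own statement) =====
-- stated objective: alternative
-- what changed: Replaced A's single stateful record-tracking scan with a two-pass decomposition: first materialise the prefix-maxima table, then detect strict increases of that table against a previous value initialised to -1.
import Mathlib
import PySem

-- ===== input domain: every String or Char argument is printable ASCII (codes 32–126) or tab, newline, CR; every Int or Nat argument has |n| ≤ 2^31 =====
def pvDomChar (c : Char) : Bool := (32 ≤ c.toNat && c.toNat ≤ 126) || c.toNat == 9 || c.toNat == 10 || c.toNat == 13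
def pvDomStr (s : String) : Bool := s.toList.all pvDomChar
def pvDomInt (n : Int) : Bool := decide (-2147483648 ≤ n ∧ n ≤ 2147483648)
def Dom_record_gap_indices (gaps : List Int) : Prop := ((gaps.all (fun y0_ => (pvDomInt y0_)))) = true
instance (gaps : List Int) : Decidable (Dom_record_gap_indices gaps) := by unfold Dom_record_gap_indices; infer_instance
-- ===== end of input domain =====

-- B replaces A's single record-tracking scan by a prefix-maxima table pass followed by an
-- increase-detection pass (alternative decomposition, same value everywhere).

-- ===== PORT A =====
-- the enumerate loop of A: index counter, accumulated indices, largest_gap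
def pvALoop (l : List Int) (n : Int) (acc : List Int) (largest : Int) : List Int :=
  match l with
  | [] => acc
  | g :: gs => if g > largest then pvALoop gs (n + 1) (acc ++ [n]) g
               else pvALoop gs (n + 1) acc largest

def record_gap_indices (gaps : List Int) : List Int :=
  pvALoop gaps 0 [] (-1)

-- ===== PORT B =====
-- first pass of B: prefix maxima (running max carried as Option, none before the first element)
def pvPrefixMax (mo : Option Int) : List Int → List Int
  | [] => []
  | g :: gs =>
      let m : Int := match mo with
        | none => g
        | some m0 => if g > m0 then g else m0
      m :: pvPrefixMax (some m) gs

-- second pass of B: emit the index whenever the prefix maximum strictly exceeds prev (init -1)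
def pvBLoop (l : List Int) (n : Int) (acc : List Int) (prev : Int) : List Int :=
  match l with
  | [] => acc
  | v :: vs => if v > prev then pvBLoop vs (n + 1) (acc ++ [n]) v
               else pvBLoop vs (n + 1) acc prev

def record_gap_indices_alt (gaps : List Int) : List Int :=
  pvBLoop (pvPrefixMax none gaps) 0 [] (-1)

-- ===== PRECONDITION & SPEC =====
def Spec_record_gap_indices (gaps : List Int) (out : List Int) : Prop := out = record_gap_indices_alt gaps
instance (gaps : List Int) (out : List Int) : Decidable (Spec_record_gap_indices gaps out) := by unfold Spec_record_gap_indices; infer_instance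

-- ===== CLAIM (what is proved, stated in full; the proofs are below) =====
def Claim_equal_record_gap_indices : Prop := ∀ (gaps : List Int), Dom_record_gap_indices gaps → Spec_record_gap_indices gaps (record_gap_indices gaps)

-- ===== LEMMAS AND PROOFS =====

-- relates the running-max seed of the prefix pass to the shared loop state s:
-- s = -1 before any element, and s = max (-1) m once the running max is m
def pvInv (mo : Option Int) (s : Int) : Prop :=
  match mo with
  | none => s = -1
  | some m => s = max (-1) m

theorem pvLoop_agree (gs : List Int) : ∀ (n : Int) (acc : List Int) (mo : Option Int) (s : Int),
    pvInv mo s → pvALoop gs n acc s = pvBLoop (pvPrefixMax mo gs) n acc s := by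
  induction gs with
  | nil => intro n acc mo s _; simp [pvALoop, pvPrefixMax, pvBLoop]
  | cons g gs ih =>
    intro n acc mo s hinv
    cases mo with
    | none =>
      simp only [pvInv] at hinv
      subst hinv
      simp only [pvPrefixMax, pvALoop, pvBLoop]
      by_cases h : g > -1
      · simp only [if_pos h]
        exact ih (n + 1) (acc ++ [n]) (some g) g (by simp [pvInv]; omega)
      · simp only [if_neg h]
        exact ih (n + 1) acc (some g) (-1) (by simp [pvInv]; omega)
    | some m0 =>
      simp only [pvInv] at hinv
      subst hinv
      simp only [pvPrefixMax, pvALoop, pvBLoop]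
      by_cases h : g > max (-1) m0
      · have hm : (if g > m0 then g else m0) = g := by
          rw [if_pos]; omega
        rw [hm]
        simp only [if_pos h]
        exact ih (n + 1) (acc ++ [n]) (some g) g (by simp [pvInv]; omega)
      · have hm2 : ¬ ((if g > m0 then g else m0) > max (-1) m0) := by
          split_ifs with hg <;> omega
        rw [if_neg h, if_neg hm2]
        have : pvInv (some (if g > m0 then g else m0)) (max (-1) m0) := by
          simp only [pvInv]; split_ifs with hg <;> omega
        exact ih (n + 1) acc (some (if g > m0 then g else m0)) (max (-1) m0) this

-- ===== VERDICT (by name: the statement is the Claim_ definition above) =====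
theorem record_gap_indices_spec : Claim_equal_record_gap_indices := by
  intro gaps _
  unfold Spec_record_gap_indices record_gap_indices record_gap_indices_alt
  exact pvLoop_agree gaps 0 [] none (-1) (by simp [pvInv])
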